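-- pv_equiv track=rewrite | github.com/Mikelkulla/n8n_scraping_backend | config/utils.py | is_non_business_domain
-- ===== SOURCE A (Python) =====
-- def is_non_business_domain(domain):
--     """Checks if a domain belongs to a list of common non-business websites.
--
--     This function is used to filter out domains that are typically not associated
--     with business entities, such as social media platforms and large consumer
--     services.
--
--     Args:
--         domain (str): The domain name to check (e.g., 'facebook.com').
--
--     Returns:
--         bool: True if the domain is in the non-business list, False otherwise.
--     """
--     non_business_domains = [
--         'airbnb.co.uk', 'airbnb.co.za', 'airbnb.com', 'airbnb.mx', 'airbnb.net',
--         'airbnbmail.com', 'booking.com', 'facebook.com', 'instagram.com', 'jscache.com',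
--         'linkedin.com', 'muscache.com', 'pinterest.com', 'snapchat.com', 'tacdn.com',
--         'tamgrt.com', 'tiktok.com', 'tripadvisor.cn', 'tripadvisor.co.uk',
--         'tripadvisor.com', 'tripadvisor.de', 'twitter.com', 'x.com', 'youtube.com'
--     ]
--     # Check if domain or any subdomain matches non-business domains
--     domain = domain.lower()
--     for non_business in non_business_domains:
--         if domain == non_business or domain.endswith('.' + non_business):
--             return True
--     return False
-- ===== SOURCE B (Python) =====
-- NON_BUSINESS_DOMAINS = frozenset(
--     "airbnb.co.uk airbnb.co.za airbnb.com airbnb.mx airbnb.net "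
--     "airbnbmail.com booking.com facebook.com instagram.com jscache.com "
--     "linkedin.com muscache.com pinterest.com snapchat.com tacdn.com "
--     "tamgrt.com tiktok.com tripadvisor.cn tripadvisor.co.uk "
--     "tripadvisor.com tripadvisor.de twitter.com x.com youtube.com".split()
-- )
--
--
-- def is_non_business_domain(domain):
--     """True iff the lowercased domain, or one of its dot-boundary suffixes,
--     is a known non-business domain."""
--     parts = domain.lower().split('.')
--     return any('.'.join(parts[i:]) in NON_BUSINESS_DOMAINS
--                for i in range(len(parts)))
-- ===== Notes on version B (the rewrite author's own statement) =====
-- stated objective: idiomatic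
-- what changed: Instead of scanning the 24-entry list with ==/endswith for each entry, B splits the lowercased domain into its dot-separated labels and tests each dotted suffix of those labels for membership in a frozenset built once from a space-separated string.
import Mathlib
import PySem

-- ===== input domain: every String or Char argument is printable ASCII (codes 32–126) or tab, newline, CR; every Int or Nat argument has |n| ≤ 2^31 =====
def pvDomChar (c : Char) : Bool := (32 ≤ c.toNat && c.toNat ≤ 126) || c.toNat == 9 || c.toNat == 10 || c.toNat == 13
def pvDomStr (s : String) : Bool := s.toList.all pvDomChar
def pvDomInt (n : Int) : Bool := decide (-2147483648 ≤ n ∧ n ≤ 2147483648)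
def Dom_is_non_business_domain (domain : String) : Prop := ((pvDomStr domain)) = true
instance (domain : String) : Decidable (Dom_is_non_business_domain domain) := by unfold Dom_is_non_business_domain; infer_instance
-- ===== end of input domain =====

-- B replaces A's per-entry ==/endswith scan of the 24-domain list by splitting the lowercased
-- input on '.' and testing each dotted suffix of the parts for membership in a set built once
-- from a space-separated string (idiomatic; not measured faster).

-- ===== PORT A =====
-- A's local list literal of non-business domains (as lists of chars; string facts are proved on the list side)
def nbDomainsA : List (List Char) :=
  ["airbnb.co.uk".toList, "airbnb.co.za".toList, "airbnb.com".toList, "airbnb.mx".toList, "airbnb.net".toList,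
   "airbnbmail.com".toList, "booking.com".toList, "facebook.com".toList, "instagram.com".toList, "jscache.com".toList,
   "linkedin.com".toList, "muscache.com".toList, "pinterest.com".toList, "snapchat.com".toList, "tacdn.com".toList,
   "tamgrt.com".toList, "tiktok.com".toList, "tripadvisor.cn".toList, "tripadvisor.co.uk".toList,
   "tripadvisor.com".toList, "tripadvisor.de".toList, "twitter.com".toList, "x.com".toList, "youtube.com".toList]

-- the loop 'for non_business in …: if … == … or ….endswith("." + …): return True' / 'return False'
def is_non_business_domain (domain : String) : Bool :=
  let d := PySem.Chars.lower domain.toList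
  nbDomainsA.any (fun nb => d == nb || PySem.Chars.endswith d ('.' :: nb))

-- ===== PORT B =====
-- Source B's module-level 'frozenset("… … …".split())'
def nbSetB : PySem.Set (List Char) :=
  PySem.Set.ofList (PySem.Chars.split₀
    ("airbnb.co.uk airbnb.co.za airbnb.com airbnb.mx airbnb.net airbnbmail.com booking.com facebook.com instagram.com jscache.com linkedin.com muscache.com pinterest.com snapchat.com tacdn.com tamgrt.com tiktok.com tripadvisor.cn tripadvisor.co.uk tripadvisor.com tripadvisor.de twitter.com x.com youtube.com".toList))

-- Source B's "any('.'.join(parts[i:]) in NON_BUSINESS_DOMAINS for i in range(len(parts)))":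
-- at step i the remaining list IS parts[i:]
def nbSuffixAny : List (List Char) → Bool
  | [] => false
  | p :: rest => PySem.Set.contains nbSetB (PySem.Chars.join ['.'] (p :: rest)) || nbSuffixAny rest

def is_non_business_domain_alt (domain : String) : Bool :=
  nbSuffixAny (PySem.Chars.splitOn (PySem.Chars.lower domain.toList) ['.'])

-- ===== PRECONDITION & SPEC =====
def Spec_is_non_business_domain (domain : String) (out : Bool) : Prop := out = is_non_business_domain_alt domain
instance (domain : String) (out : Bool) : Decidable (Spec_is_non_business_domain domain out) := by unfold Spec_is_non_business_domain; infer_instance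

-- ===== CLAIM (what is proved, stated in full; the proofs are below) =====
def Claim_equal_is_non_business_domain : Prop := ∀ (domain : String), Dom_is_non_business_domain domain → Spec_is_non_business_domain domain (is_non_business_domain domain)

-- ===== LEMMAS AND PROOFS =====

-- B's set holds exactly A's 24 domains
set_option maxRecDepth 4000 in
theorem mem_nbSetB_iff (x : List Char) : x ∈ nbSetB ↔ x ∈ nbDomainsA := by
  rw [nbSetB, PySem.Set.mem_ofList]
  have h : PySem.Chars.split₀
    ("airbnb.co.uk airbnb.co.za airbnb.com airbnb.mx airbnb.net airbnbmail.com booking.com facebook.com instagram.com jscache.com linkedin.com muscache.com pinterest.com snapchat.com tacdn.com tamgrt.com tiktok.com tripadvisor.cn tripadvisor.co.uk tripadvisor.com tripadvisor.de twitter.com x.com youtube.com".toList)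
      = nbDomainsA := by decide
  rw [h]

theorem modifyHead_fun_id {α : Type} (l : List α) : l.modifyHead (fun x => x) = l := by
  cases l <;> rfl

-- PySem's Python-split on ['.'] agrees with Mathlib's List.splitOn '.'
theorem go_spec : ∀ (l : List Char) (fuel : Nat) (cur : List Char) (acc : List (List Char)),
    l.length < fuel →
    PySem.Chars.splitOn.go ['.'] fuel l cur acc
      = acc.reverse ++ (l.splitOn '.').modifyHead (cur.reverse ++ ·) := by
  intro l
  induction l with
  | nil =>
    intro fuel cur acc h
    cases fuel with
    | zero => omega
    | succ f => simp [PySem.Chars.splitOn.go, List.splitOn]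
  | cons c rest ih =>
    intro fuel cur acc h
    cases fuel with
    | zero => omega
    | succ f =>
      by_cases hc : c = '.'
      · subst hc
        rw [show PySem.Chars.splitOn.go ['.'] (f+1) ('.' :: rest) cur acc
              = PySem.Chars.splitOn.go ['.'] f rest [] (cur.reverse :: acc) by
            simp [PySem.Chars.splitOn.go, List.isPrefixOf]]
        rw [ih f [] (cur.reverse :: acc) (by simpa using h)]
        simp [List.splitOn, List.splitOnP_cons, modifyHead_fun_id]
      · rw [show PySem.Chars.splitOn.go ['.'] (f+1) (c :: rest) cur acc
              = PySem.Chars.splitOn.go ['.'] f rest (c :: cur) acc by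
            simp only [PySem.Chars.splitOn.go, List.isPrefixOf, Bool.and_eq_true, beq_iff_eq]
            rw [if_neg (by simp [Ne.symm hc])]]
        rw [ih f (c :: cur) acc (by simpa using h)]
        simp only [List.splitOn, List.splitOnP_cons]
        rw [if_neg (by simp [hc])]
        rcases hsp : rest.splitOnP (· == '.') with _ | ⟨hd, tl⟩
        · exact absurd hsp (List.splitOnP_ne_nil _ _)
        · simp

theorem splitOn_eq (cs : List Char) :
    PySem.Chars.splitOn cs ['.'] = cs.splitOn '.' := by
  rw [PySem.Chars.splitOn, go_spec cs (cs.length + 1) [] [] (by omega)]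
  rcases h : cs.splitOn '.' with _ | ⟨hd, tl⟩
  · exact absurd h (List.splitOnP_ne_nil _ _)
  · simp

-- B's loop succeeds iff some nonempty suffix of the parts joins to a listed domain
theorem nbSuffixAny_iff (ps : List (List Char)) :
    nbSuffixAny ps = true ↔ ∃ qs, qs <:+ ps ∧ qs ≠ [] ∧ ['.'].intercalate qs ∈ nbDomainsA := by
  induction ps with
  | nil => simp [nbSuffixAny]
  | cons p rest ih =>
    simp only [nbSuffixAny, Bool.or_eq_true, PySem.Set.contains_iff, mem_nbSetB_iff,
      PySem.Chars.join, ih]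
    constructor
    · rintro (hmem | ⟨qs, hsuf, hne, hmem⟩)
      · exact ⟨p :: rest, List.suffix_refl _, by simp, hmem⟩
      · exact ⟨qs, hsuf.trans (List.suffix_cons _ _), hne, hmem⟩
    · rintro ⟨qs, hsuf, hne, hmem⟩
      rcases List.suffix_cons_iff.mp hsuf with heq | hsuf'
      · cases heq; exact Or.inl hmem
      · exact Or.inr ⟨qs, hsuf', hne, hmem⟩

-- A's scan holds iff some listed domain matches exactly or as a '.'-boundary suffix
theorem anyA_iff (d : List Char) :
    (nbDomainsA.any (fun nb => d == nb || PySem.Chars.endswith d ('.' :: nb))) = true ↔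
      ∃ nb ∈ nbDomainsA, d = nb ∨ ('.' :: nb) <:+ d := by
  simp [List.any_eq_true, PySem.Chars.endswith_iff]

-- joining a proper nonempty suffix of the parts sits after a '.' in the join of all parts
theorem suffix_intercalate : ∀ (rs qs : List (List Char)), qs ≠ [] → rs ≠ [] →
    ('.' :: ['.'].intercalate qs) <:+ ['.'].intercalate (rs ++ qs) := by
  intro rs
  induction rs with
  | nil => intro qs _ h; exact absurd rfl h
  | cons r rs' ih =>
    intro qs hqs _
    by_cases hrs' : rs' = []
    · subst hrs'
      rcases qs with _ | ⟨q, qs'⟩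
      · exact absurd rfl hqs
      · rw [show ['.'].intercalate ((r :: ([] : List (List Char))) ++ q :: qs')
              = r ++ '.' :: ['.'].intercalate (q :: qs') by simp [List.intercalate]]
        exact List.suffix_append _ _
    · have h1 : ('.' :: ['.'].intercalate qs) <:+ ['.'].intercalate (rs' ++ qs) :=
        ih qs hqs hrs'
      have h2 : ['.'].intercalate ((r :: rs') ++ qs)
          = r ++ '.' :: ['.'].intercalate (rs' ++ qs) := by
        rcases hcons : rs' ++ qs with _ | ⟨a, b⟩
        · rcases qs with _ | _
          · exact absurd rfl hqs
          · simp at hcons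
        · rw [List.cons_append, hcons]; simp [List.intercalate]

      rw [h2]
      exact (h1.trans (List.suffix_cons _ _)).trans (List.suffix_append _ _)

-- ===== VERDICT (by name: the statement is the Claim_ definition above) =====
theorem is_non_business_domain_spec : Claim_equal_is_non_business_domain := by
  intro domain _
  unfold Spec_is_non_business_domain is_non_business_domain is_non_business_domain_alt
  set d := PySem.Chars.lower domain.toList with hd
  rw [splitOn_eq, Bool.eq_iff_iff, anyA_iff, nbSuffixAny_iff]
  constructor
  · rintro ⟨nb, hmem, heq | ⟨pre, hpre⟩⟩
    · exact ⟨d.splitOn '.', List.suffix_refl _, List.splitOnP_ne_nil _ _,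
        by rw [List.intercalate_splitOn]; exact heq ▸ hmem⟩
    · refine ⟨nb.splitOn '.', ?_, List.splitOnP_ne_nil _ _,
        by rw [List.intercalate_splitOn]; exact hmem⟩
      rw [← hpre,
        show (pre ++ '.' :: nb).splitOn '.' = pre.splitOn '.' ++ nb.splitOn '.' from
          List.splitOnP_append_cons _ _ _ _ (by simp)]
      exact List.suffix_append _ _
  · rintro ⟨qs, hsuf, hne, hmem⟩
    by_cases hq : qs = d.splitOn '.'
    · subst hq
      exact ⟨['.'].intercalate (d.splitOn '.'), hmem,
        Or.inl (by rw [List.intercalate_splitOn])⟩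
    · obtain ⟨rs, hrs⟩ := hsuf
      have hrsne : rs ≠ [] := by
        rintro rfl; exact hq (by simpa using hrs)
      refine ⟨['.'].intercalate qs, hmem, Or.inr ?_⟩
      have := suffix_intercalate rs qs hne hrsne
      rw [hrs, List.intercalate_splitOn] at this
      exact this
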